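-- pv_equiv track=rewrite | github.com/tedtieken/django-slingshot | scaffold/helpers.py | form_format
-- ===== SOURCE A (Python) =====
-- def form_format(string):
--     x = ""
--     skip=False
--     count = 0
--     for i in string:
--         if count == 0:
--             i = i.upper()
--         count += 1
--         if skip == True:
--             skip = False
--             x += i.upper()
--         else:
--             if i in ["-", "_"]:
--                 skip = True
--             else:
--                 x += i
--     return x
-- ===== SOURCE B (Python) =====
-- def form_format(string):
--     # capitalize first char up front, then consume separator+next-char pairs with an iterator
--     string = string[:1].upper() + string[1:]
--     chars = []
--     it = iter(string)
--     for ch in it: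
--         if ch in ("-", "_"):
--             chars.append(next(it, "").upper())
--         else:
--             chars.append(ch)
--     return "".join(chars)
-- ===== Notes on version B (the rewrite author's own statement) =====
-- stated objective: simpler
-- what changed: Replaced the boolean skip-flag/count state machine with an iterator loop that capitalizes the first character up front and lets each separator consume and upper-case the following character directly, joining a list instead of repeated string concatenation.
import Mathlib
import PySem

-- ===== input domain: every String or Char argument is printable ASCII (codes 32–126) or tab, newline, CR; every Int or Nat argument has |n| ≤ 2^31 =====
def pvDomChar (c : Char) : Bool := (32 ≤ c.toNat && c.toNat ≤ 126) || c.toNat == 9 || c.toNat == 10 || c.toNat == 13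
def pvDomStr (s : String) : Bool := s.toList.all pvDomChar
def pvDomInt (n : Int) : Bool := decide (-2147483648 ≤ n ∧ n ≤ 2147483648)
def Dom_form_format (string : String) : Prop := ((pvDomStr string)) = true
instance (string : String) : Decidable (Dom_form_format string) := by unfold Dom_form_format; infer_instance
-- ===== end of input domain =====

-- B replaces A's boolean skip-flag state machine by iterator pair-consumption (capitalize first char up
-- front, then drop each separator together with upper-casing the char it consumes next); objective: idiomatic.


-- ===== PORT A =====
-- A's for-loop over the characters, carrying (x, skip, count) exactly as the Python does.
def ffLoop : List Char → List Char → Bool → Int → List Char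
  | [], x, _, _ => x
  | i :: rest, x, skip, count =>
    let i := if count = 0 then i.toUpper else i
    let count := count + 1
    if skip = true then ffLoop rest (x ++ [i.toUpper]) false count
    else if i = '-' ∨ i = '_' then ffLoop rest x true count
    else ffLoop rest (x ++ [i]) skip count

def form_format (string : String) : String :=
  String.ofList (ffLoop string.toList [] false 0)

-- ===== PORT B =====
-- the iterator loop: a separator consumes the next character (upper-cased); ch.upper() = Char.toUpper on ASCII
def ffAlt : List Char → List Char
  | [] => []
  | [c] => if c = '-' ∨ c = '_' then [] else [c]
  | c :: d :: rest =>
    if c = '-' ∨ c = '_' then d.toUpper :: ffAlt rest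
    else c :: ffAlt (d :: rest)

-- string[:1].upper() + string[1:] is the head-uppercase on the char list (exact for any string)
def form_format_alt (string : String) : String :=
  match string.toList with
  | [] => ""
  | c :: rest => String.ofList (ffAlt (c.toUpper :: rest))

-- ===== PRECONDITION & SPEC =====
def Spec_form_format (string : String) (out : String) : Prop := out = form_format_alt string
instance (string : String) (out : String) : Decidable (Spec_form_format string out) := by unfold Spec_form_format; infer_instance

-- ===== CLAIM (what is proved, stated in full; the proofs are below) =====
def Claim_equal_form_format : Prop := ∀ (string : String), Dom_form_format string → Spec_form_format string (form_format string)

-- ===== LEMMAS AND PROOFS =====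
theorem ffLoop_cons (i : Char) (rest x : List Char) (skip : Bool) (c : Int) :
    ffLoop (i :: rest) x skip c =
      (let i' := if c = 0 then i.toUpper else i;
       if skip = true then ffLoop rest (x ++ [i'.toUpper]) false (c + 1)
       else if i' = '-' ∨ i' = '_' then ffLoop rest x true (c + 1)
       else ffLoop rest (x ++ [i']) skip (c + 1)) := rfl

theorem ffAlt_nonsep (c : Char) (rest : List Char) (h : ¬(c = '-' ∨ c = '_')) :
    ffAlt (c :: rest) = c :: ffAlt rest := by
  cases rest <;> simp [ffAlt, h]

-- steady state (count ≥ 1, skip = false): A's loop appends exactly ffAlt of the remaining input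
theorem ffLoop_eq_ffAlt : ∀ (n : Nat) (l x : List Char) (c : Int),
    l.length ≤ n → 1 ≤ c → ffLoop l x false c = x ++ ffAlt l := by
  intro n
  induction n with
  | zero =>
    intro l x c hl _
    have : l = [] := List.eq_nil_of_length_eq_zero (Nat.le_zero.mp hl)
    subst this; simp [ffLoop, ffAlt]
  | succ n ih =>
    intro l x c hl hc
    match l with
    | [] => simp [ffLoop, ffAlt]
    | i :: rest =>
      have hi : ¬ (c = 0) := by omega
      by_cases hsep : i = '-' ∨ i = '_'
      · rw [ffLoop_cons]
        simp only [hi, if_false, if_pos hsep, Bool.false_eq_true]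
        match rest with
        | [] => simp [ffLoop, ffAlt, hsep]
        | d :: rest' =>
          have hd : ¬ (c + 1 = 0) := by omega
          rw [ffLoop_cons]
          simp only [hd, if_false, if_true]
          rw [ih rest' (x ++ [d.toUpper]) (c + 1 + 1) (by simp at hl ⊢; omega) (by omega)]
          simp [ffAlt, hsep]
      · rw [ffLoop_cons]
        simp only [hi, if_false, if_neg hsep, Bool.false_eq_true]
        rw [ih rest (x ++ [i]) (c + 1) (by simp at hl; omega) (by omega)]
        rw [ffAlt_nonsep i rest hsep]
        simp

-- ===== VERDICT (by name: the statement is the Claim_ definition above) =====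
theorem form_format_spec : Claim_equal_form_format := by
  intro s _
  unfold Spec_form_format form_format form_format_alt
  match hs : s.toList with
  | [] => simp [ffLoop]
  | i :: rest =>
    rw [ffLoop_cons]
    norm_num
    by_cases hsep : i.toUpper = '-' ∨ i.toUpper = '_'
    · simp only [if_pos hsep]
      match rest with
      | [] => simp [ffLoop, ffAlt, hsep]
      | d :: rest' =>
        rw [ffLoop_cons]
        have hd : ¬ ((1 : Int) = 0) := by omega
        simp only [hd, if_false, if_true]
        rw [ffLoop_eq_ffAlt rest'.length rest' ([] ++ [d.toUpper]) (1 + 1) le_rfl (by omega)]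
        simp [ffAlt, hsep]
    · simp only [if_neg hsep]
      rw [show [i.toUpper] = [] ++ [i.toUpper] from rfl,
        ffLoop_eq_ffAlt rest.length rest ([] ++ [i.toUpper]) 1 le_rfl (by omega)]
      rw [ffAlt_nonsep _ rest hsep]
      simp
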